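-- pv_equiv track=rewrite | github.com/mkappers/aoc | Day9/day9_pt2.py | find_free_block
-- ===== SOURCE A (Python) =====
-- def find_free_block(size, layout):
--     # Left bound inclusive, right bound exclusive
--     lb = None
--     rb = None
--     for i in range(len(layout)):
--         if layout[i] == '.' and lb is None:
--             lb = i
--         elif layout[i] != '.' and lb is not None:
--             rb = i
--
--         if lb is not None and rb is not None:
--             if rb - lb >= size:
--                 break
--             else:
--                 lb = None
--                 rb = None
--
--     # End of list
--     if lb is not None and rb is None:
--         if len(layout) - lb >= size:
--             rb = len(layout)
--         else:
--             return None
--     elif lb is None and rb is None: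
--         return None
--
--     return (lb, rb)
-- ===== SOURCE B (Python) =====
-- def find_free_block(size, layout):
--     # Walk the layout; at each '.' measure its maximal run directly and
--     # return its span if long enough, otherwise jump past the run.
--     n = len(layout)
--     i = 0
--     while i < n:
--         if layout[i] == '.':
--             j = i + 1
--             while j < n and layout[j] == '.':
--                 j += 1
--             if j - i >= size:
--                 return (i, j)
--             i = j
--         else:
--             i += 1
--     return None
-- ===== Notes on version B (the rewrite author's own statement) =====
-- stated objective: simpler
-- what changed: Replaces A's lb/rb Option-state machine with reset logic and a post-loop end-of-list fixup by a direct run scanner: at each '.' an inner loop measures the maximal run and returns its span immediately if long enough.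
import Mathlib
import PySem

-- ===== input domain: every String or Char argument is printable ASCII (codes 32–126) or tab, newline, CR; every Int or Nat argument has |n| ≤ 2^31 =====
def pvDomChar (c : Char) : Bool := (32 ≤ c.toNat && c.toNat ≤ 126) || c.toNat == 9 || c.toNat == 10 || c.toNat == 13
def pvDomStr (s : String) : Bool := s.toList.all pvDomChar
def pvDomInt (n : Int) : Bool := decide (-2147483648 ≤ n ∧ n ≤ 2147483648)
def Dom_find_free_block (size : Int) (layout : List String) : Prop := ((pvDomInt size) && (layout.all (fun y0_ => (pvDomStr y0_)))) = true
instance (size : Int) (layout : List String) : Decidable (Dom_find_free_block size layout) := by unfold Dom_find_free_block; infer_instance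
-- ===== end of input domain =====

-- B replaces A's lb/rb state machine (with reset and post-loop fixup) by a direct
-- run scanner: at each '.' an inner loop measures the maximal run and returns its
-- span immediately if long enough. Objective: simpler.

-- ===== PORT A =====
-- the for-loop of A, with its break: state lb/rb, index i
def loopA (size : Int) (layout : List String) (i : Nat) (lb rb : Option Int) :
    Option Int × Option Int :=
  if h : i < layout.length then
    let c := layout[i]
    -- Python's if/elif pair: the two conditions are mutually exclusive
    -- (c == '.' in one, c != '.' in the other), so two independent ifs are exact
    let lb1 := if c == "." && lb.isNone then some (i : Int) else lb
    let rb1 := if c != "." && lb.isSome then some (i : Int) else rb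
    if lb1.isSome && rb1.isSome then
      if rb1.getD 0 - lb1.getD 0 ≥ size then (lb1, rb1)
      else loopA size layout (i+1) none none
    else loopA size layout (i+1) lb1 rb1
  else (lb, rb)
termination_by layout.length - i

def find_free_block (size : Int) (layout : List String) : Option (Int × Int) :=
  match loopA size layout 0 none none with
  | (some l, none) =>
      if (layout.length : Int) - l ≥ size then some (l, (layout.length : Int)) else none
  | (none, none) => none
  | (some l, some r) => some (l, r)
  | (none, some _) => none  -- unreachable state of A's loop (rb is only set while lb is set)

-- ===== PORT B =====
-- Source B's inner while loop: advance j while layout[j] == '.'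
def runEnd (layout : List String) (j : Nat) : Nat :=
  if h : j < layout.length then
    if layout[j] == "." then runEnd layout (j+1) else j
  else j
termination_by layout.length - j

theorem runEnd_ge (layout : List String) (j : Nat) : j ≤ runEnd layout j := by
  unfold runEnd
  split
  · split
    · exact le_trans (Nat.le_succ j) (runEnd_ge layout (j+1))
    · exact le_refl j
  · exact le_refl j
termination_by layout.length - j

-- Source B's outer while loop on index i
def loopB (size : Int) (layout : List String) (i : Nat) : Option (Int × Int) :=
  if h : i < layout.length then
    if layout[i] == "." then
      let j := runEnd layout (i+1)
      if (j : Int) - (i : Int) ≥ size then some ((i : Int), (j : Int))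
      else loopB size layout j
    else loopB size layout (i+1)
  else none
termination_by layout.length - i
decreasing_by
  · have := runEnd_ge layout (i+1); omega
  · omega

def find_free_block_alt (size : Int) (layout : List String) : Option (Int × Int) :=
  loopB size layout 0

-- ===== PRECONDITION & SPEC =====
def Spec_find_free_block (size : Int) (layout : List String) (out : Option (Int × Int)) : Prop := out = find_free_block_alt size layout
instance (size : Int) (layout : List String) (out : Option (Int × Int)) : Decidable (Spec_find_free_block size layout out) := by unfold Spec_find_free_block; infer_instance

-- ===== CLAIM (what is proved, stated in full; the proofs are below) =====
def Claim_equal_find_free_block : Prop := ∀ (size : Int) (layout : List String), Dom_find_free_block size layout → Spec_find_free_block size layout (find_free_block size layout)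

-- ===== LEMMAS AND PROOFS =====

-- A's post-loop fixup, as a helper for the proofs
def postA (size : Int) (layout : List String) : Option Int × Option Int → Option (Int × Int)
  | (some l, none) =>
      if (layout.length : Int) - l ≥ size then some (l, (layout.length : Int)) else none
  | (none, none) => none
  | (some l, some r) => some (l, r)
  | (none, some _) => none

theorem find_free_block_eq_postA (size : Int) (layout : List String) :
    find_free_block size layout = postA size layout (loopA size layout 0 none none) := by
  unfold find_free_block postA
  rfl

theorem runEnd_le (layout : List String) (j : Nat) (h : j ≤ layout.length) :
    runEnd layout j ≤ layout.length := by
  unfold runEnd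
  split
  · split
    · exact runEnd_le layout (j+1) (by omega)
    · exact h
  · exact h
termination_by layout.length - j

theorem runEnd_oob (layout : List String) (j : Nat) (h : ¬ j < layout.length) :
    runEnd layout j = j := by
  rw [runEnd]; simp [h]

theorem runEnd_nondot (layout : List String) (j : Nat) (h : j < layout.length)
    (hd : (layout[j]'h == ".") = false) : runEnd layout j = j := by
  rw [runEnd]; simp [h, hd]

theorem runEnd_dot (layout : List String) (j : Nat) (h : j < layout.length)
    (hd : (layout[j]'h == ".") = true) : runEnd layout j = runEnd layout (j+1) := by
  rw [runEnd]; simp [h, hd]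

-- the cell at which the inner while loop stops (if in range) is not a '.'
theorem runEnd_stop (layout : List String) (j : Nat)
    (h : runEnd layout j < layout.length) :
    (layout[runEnd layout j]'h == ".") = false := by
  by_cases hj : j < layout.length
  · by_cases hd : (layout[j]'hj == ".") = true
    · have e : runEnd layout j = runEnd layout (j+1) := runEnd_dot layout j hj hd
      simp only [e] at h ⊢
      exact runEnd_stop layout (j+1) h
    · have hbe : (layout[j]'hj == ".") = false := by
        cases hx : (layout[j]'hj == ".") <;> simp_all
      have e : runEnd layout j = j := runEnd_nondot layout j hj hbe
      simp only [e] at h ⊢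
      exact hbe
  · have e : runEnd layout j = j := runEnd_oob layout j hj
    rw [e] at h; exact absurd h hj
termination_by layout.length - j

-- A's loop, once lb is set and rb is not, runs to the end of the current '.'-run
theorem loopA_run (size : Int) (layout : List String) (i : Nat) (l : Int) :
    loopA size layout i (some l) none =
      (if runEnd layout i < layout.length then
         if ((runEnd layout i : Int)) - l ≥ size then
           (some l, some ((runEnd layout i : Int)))
         else loopA size layout (runEnd layout i + 1) none none
       else (some l, none)) := by
  by_cases h : i < layout.length
  · by_cases hd : (layout[i]'h == ".") = true
    · have e : runEnd layout i = runEnd layout (i+1) := runEnd_dot layout i h hd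
      rw [loopA, e]
      simp only [dif_pos h, hd, bne, Bool.not_true, Option.isNone_some, Bool.and_false,
        Bool.false_eq_true, if_false, Option.isSome_none, Option.isSome_some,
        Bool.and_true]
      exact loopA_run size layout (i+1) l
    · have hbe : (layout[i]'h == ".") = false := by
        cases hx : (layout[i]'h == ".") <;> simp_all
      have e : runEnd layout i = i := runEnd_nondot layout i h hbe
      rw [loopA, e]
      simp only [dif_pos h, hbe, bne, Bool.not_false, Option.isNone_some, Bool.false_eq_true, if_false, Option.isSome_some, Bool.and_self,
        if_true, Option.getD_some, if_pos h]
  · have e : runEnd layout i = i := runEnd_oob layout i h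
    rw [loopA, e]
    simp [h]
termination_by layout.length - i

-- main invariant: A's loop from i with clean state, plus A's fixup, equals B's loop from i
theorem main_inv (size : Int) (layout : List String) (i : Nat) :
    postA size layout (loopA size layout i none none) = loopB size layout i := by
  rw [loopA, loopB]
  by_cases h : i < layout.length
  · simp only [dif_pos h]
    by_cases hd : (layout[i]'h == ".") = true
    · -- dot at i: A sets lb := i, B measures the run
      simp only [hd, bne, Bool.not_true, Option.isNone_none, Bool.and_true, if_true,
        Bool.false_eq_true, if_false, Option.isSome_some, Option.isSome_none,
        Bool.and_false]
      rw [loopA_run size layout (i+1) (i : Int)]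
      by_cases hj : runEnd layout (i+1) < layout.length
      · simp only [if_pos hj]
        by_cases hs : ((runEnd layout (i+1) : Int)) - (i : Int) ≥ size
        · simp [hs, postA]
        · simp only [if_neg hs]
          -- B recurses to the run end j; layout[j] is not '.', so B steps on to j+1
          have hnd := runEnd_stop layout (i+1) hj
          have step : loopB size layout (runEnd layout (i+1)) =
              loopB size layout (runEnd layout (i+1) + 1) := by
            rw [loopB]; simp [hj, hnd]
          rw [step]
          exact main_inv size layout (runEnd layout (i+1) + 1)
      · have hle : runEnd layout (i+1) ≤ layout.length :=
          runEnd_le layout (i+1) (by omega)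
        have hjeq : runEnd layout (i+1) = layout.length := by omega
        simp only [hjeq]
        have hend : loopB size layout layout.length = none := by
          rw [loopB]; simp
        rw [hend]
        simp [postA]
    · -- non-dot at i: both loops step to i+1 with unchanged (clean) state
      have hbe : (layout[i]'h == ".") = false := by
        cases hx : (layout[i]'h == ".") <;> simp_all
      simp only [hbe, bne, Option.isNone_none, Bool.and_true,
        Bool.false_eq_true, if_false, Option.isSome_none, Bool.and_false,
        Bool.and_self]
      rw [main_inv size layout (i+1)]
  · simp [h, postA]
termination_by layout.length - i
decreasing_by
  all_goals (have := runEnd_ge layout (i+1); omega)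

-- ===== VERDICT (by name: the statement is the Claim_ definition above) =====
theorem find_free_block_spec : Claim_equal_find_free_block := by
  intro size layout _
  unfold Spec_find_free_block find_free_block_alt
  rw [find_free_block_eq_postA, main_inv]
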